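-- pv_equiv track=rewrite | github.com/MukulCode/CodingClubIndia | guessmoviename.py | create_question
-- ===== SOURCE A (Python) =====
-- def create_question(movie):
--     letters=list(movie)
--     length=len(letters)
--     temp=[]
--     for i in range(length):
--         if(letters[i]==" "):
--             temp.append(" ")
--         else:
--             temp.append("*")
--     qn="".join(str(x) for x in temp )
--     return qn
-- ===== SOURCE B (Python) =====
-- def create_question(movie):
--     return " ".join("*" * len(seg) for seg in movie.split(" "))
-- ===== Notes on version B (the rewrite author's own statement) =====
-- stated objective: simpler
-- what changed: Replaces the per-character index loop, branch and list-append with a split on single spaces, masking each segment as a whole (asterisk repeated len times) and rejoining with single spaces.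
import Mathlib
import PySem

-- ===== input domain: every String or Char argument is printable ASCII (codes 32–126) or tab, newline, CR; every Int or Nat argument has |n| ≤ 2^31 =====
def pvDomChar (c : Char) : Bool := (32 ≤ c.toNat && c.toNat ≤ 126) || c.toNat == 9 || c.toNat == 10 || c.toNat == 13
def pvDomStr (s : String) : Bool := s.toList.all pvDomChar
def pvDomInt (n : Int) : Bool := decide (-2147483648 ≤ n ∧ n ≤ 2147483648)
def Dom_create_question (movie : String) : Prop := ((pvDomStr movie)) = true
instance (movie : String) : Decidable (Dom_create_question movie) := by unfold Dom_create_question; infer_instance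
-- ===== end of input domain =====

-- B replaces A's per-character loop with split-on-space / mask-each-segment / rejoin (simpler decomposition).

-- ===== PORT A =====
def create_question (movie : String) : String :=
  let letters := movie.toList
  let length : Int := PySem.List.len letters
  let temp : List Char :=
    (PySem.List.pyRange 0 length 1).foldl
      (fun temp i =>
        if PySem.List.pyGetD letters i ' ' = ' ' then temp ++ [' '] else temp ++ ['*'])
      []
  String.mk (PySem.Chars.join [] (temp.map (fun c => [c])))

-- ===== PORT B =====
-- "*" * len(seg)
def pvMask (seg : List Char) : List Char := List.replicate seg.length '*'

def create_question_alt (movie : String) : String :=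
  String.mk (List.intercalate [' '] ((movie.toList.splitOn ' ').map pvMask))

-- ===== PRECONDITION & SPEC =====
def Spec_create_question (movie : String) (out : String) : Prop := out = create_question_alt movie
instance (movie : String) (out : String) : Decidable (Spec_create_question movie out) := by unfold Spec_create_question; infer_instance

-- ===== CLAIM (what is proved, stated in full; the proofs are below) =====
def Claim_equal_create_question : Prop := ∀ (movie : String), Dom_create_question movie → Spec_create_question movie (create_question movie)

-- ===== LEMMAS AND PROOFS =====

-- intercalate: a leading empty segment contributes one separator
lemma intercalate_nil_cons (sep q : List Char) (rest : List (List Char)) :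
    List.intercalate sep ([] :: q :: rest) = sep ++ List.intercalate sep (q :: rest) := by
  simp [List.intercalate, List.intersperse_cons₂]

-- intercalate: a character at the head of the first segment stays in front
lemma intercalate_cons_head (sep : List Char) (a : Char) (p : List Char) (rest : List (List Char)) :
    List.intercalate sep ((a :: p) :: rest) = a :: List.intercalate sep (p :: rest) := by
  cases rest with
  | nil => simp [List.intercalate]
  | cons r rs => simp [List.intercalate, List.intersperse_cons₂]

-- key: splitting on ' ', masking each segment and rejoining equals masking characterwise
lemma split_mask_join (cs : List Char) :
    List.intercalate [' '] ((cs.splitOn ' ').map pvMask)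
      = cs.map (fun c => if c = ' ' then ' ' else '*') := by
  induction cs with
  | nil => simp [List.splitOn, List.splitOnP_nil, pvMask, List.intercalate]
  | cons c cs ih =>
    by_cases hc : c = ' '
    · subst hc
      obtain ⟨q, rest, hq⟩ := List.exists_cons_of_ne_nil (List.splitOnP_ne_nil (fun x => x == ' ') cs)
      simp only [List.splitOn, List.splitOnP_cons, beq_self_eq_true, if_true] at *
      rw [hq] at ih ⊢
      simp only [List.map_cons]
      rw [show pvMask [] = [] from rfl, intercalate_nil_cons]
      simp only [List.map_cons] at ih
      rw [ih]
      simp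
    · obtain ⟨q, rest, hq⟩ := List.exists_cons_of_ne_nil (List.splitOnP_ne_nil (fun x => x == ' ') cs)
      simp only [List.splitOn, List.splitOnP_cons] at *
      rw [if_neg (by simp [hc]), hq]
      rw [hq] at ih
      have hmask : pvMask (c :: q) = '*' :: pvMask q := by
        simp [pvMask, List.replicate_succ]
      simp only [List.modifyHead_cons, List.map_cons, hmask, intercalate_cons_head]
      simp only [List.map_cons] at ih
      rw [ih]
      simp [hc]

-- A's loop builds exactly the characterwise mask
lemma create_question_eq_map (movie : String) :
    create_question movie
      = String.mk (movie.toList.map (fun c => if c = ' ' then ' ' else '*')) := by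
  unfold create_question
  have hbody : (fun (temp : List Char) (i : Int) =>
      if PySem.List.pyGetD movie.toList i ' ' = ' ' then temp ++ [' '] else temp ++ ['*'])
      = fun temp i => temp ++ [if PySem.List.pyGetD movie.toList i ' ' = ' ' then ' ' else '*'] := by
    funext temp i; split_ifs <;> rfl
  simp only [hbody, PySem.List.foldl_append_singleton_eq_map, List.nil_append]
  rw [show (fun (i : Int) => if PySem.List.pyGetD movie.toList i ' ' = ' ' then ' ' else '*')
      = (fun c => if c = ' ' then ' ' else '*') ∘ (fun i => PySem.List.pyGetD movie.toList i ' ')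
      from rfl, ← List.map_map]
  rw [show PySem.List.pyRange 0 (PySem.List.len movie.toList) 1
      = PySem.List.pyRange 0 (PySem.List.len movie.toList) from rfl]
  rw [PySem.List.map_pyGetD_pyRange_zero]
  rw [PySem.Chars.join_nil_singletons]

-- ===== VERDICT (by name: the statement is the Claim_ definition above) =====
theorem create_question_spec : Claim_equal_create_question := by
  intro movie _
  unfold Spec_create_question create_question_alt
  rw [create_question_eq_map, split_mask_join]
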